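-- pv_equiv track=rewrite | github.com/Mikey-Ice/showparse-CLI-tool | showparse_fsm.py | summarize_file_status
-- ===== SOURCE A (Python) =====
-- def summarize_file_status(match_entries):
--     """Collapse per-match statuses into one file-level status."""
--     statuses = [entry["status"] for entry in match_entries]
--
--     if any(status == "parse_error" for status in statuses):
--         if len(statuses) == 1 or all(status == "parse_error" for status in statuses):
--             return "parse_error"
--         return "partial_parse_error"
--
--     if any(status == "ok" for status in statuses):
--         return "ok"
--
--     return "parse_empty"
-- ===== SOURCE B (Python) =====
-- def summarize_file_status(match_entries):
--     """Collapse per-match statuses into one file-level status (single counting pass)."""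
--     total = err = ok = 0
--     for entry in match_entries:
--         s = entry["status"]
--         total += 1
--         if s == "parse_error":
--             err += 1
--         elif s == "ok":
--             ok += 1
--     if err > 0:
--         return "parse_error" if err == total else "partial_parse_error"
--     if ok > 0:
--         return "ok"
--     return "parse_empty"
-- ===== Notes on version B (the rewrite author's own statement) =====
-- stated objective: simpler
-- what changed: Replaces the status-list build plus up-to-three any/all scans with a single counting pass and a final decision from the tallies; the len==1 guard is subsumed by err==total.
import Mathlib
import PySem

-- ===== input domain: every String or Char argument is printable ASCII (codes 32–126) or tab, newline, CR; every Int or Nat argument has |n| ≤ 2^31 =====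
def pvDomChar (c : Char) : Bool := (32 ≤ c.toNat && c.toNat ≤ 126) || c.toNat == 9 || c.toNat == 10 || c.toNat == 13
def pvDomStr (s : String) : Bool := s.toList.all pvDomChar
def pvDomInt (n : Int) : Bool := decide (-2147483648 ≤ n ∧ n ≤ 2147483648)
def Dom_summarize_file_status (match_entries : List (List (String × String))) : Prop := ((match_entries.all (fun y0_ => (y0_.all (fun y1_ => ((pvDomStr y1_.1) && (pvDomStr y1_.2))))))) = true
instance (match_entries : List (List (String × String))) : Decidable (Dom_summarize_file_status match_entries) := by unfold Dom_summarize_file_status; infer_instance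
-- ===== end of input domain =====

-- B replaces the status-list + any/all scans of A with one counting pass; objective: simpler.
-- ===== PORT A =====
-- entry["status"]: first-match association-list lookup; KeyError (lookup = none) is excluded by Pre_,
-- so the .getD "" default is never the value used on admitted inputs.
def summarize_file_status (match_entries : List (List (String × String))) : String :=
  let statuses := match_entries.map (fun e => (e.lookup "status").getD "")
  if statuses.any (fun s => s == "parse_error") then
    if statuses.length == 1 || statuses.all (fun s => s == "parse_error") then "parse_error"
    else "partial_parse_error"
  else if statuses.any (fun s => s == "ok") then "ok"
  else "parse_empty"

-- ===== PORT B =====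
def summarize_file_status_alt (match_entries : List (List (String × String))) : String :=
  let c := match_entries.foldl
    (fun (acc : Int × Int × Int) e =>
      let s := (e.lookup "status").getD ""
      (acc.1 + 1,
       (if s == "parse_error" then acc.2.1 + 1 else acc.2.1),
       (if s == "parse_error" then acc.2.2 else if s == "ok" then acc.2.2 + 1 else acc.2.2)))
    (0, 0, 0)
  if c.2.1 > 0 then
    if c.2.1 == c.1 then "parse_error" else "partial_parse_error"
  else if c.2.2 > 0 then "ok"
  else "parse_empty"

-- ===== PRECONDITION & SPEC =====
-- Pre_ excludes exactly the inputs where Python A raises KeyError: an entry without a "status" key.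
def Pre_summarize_file_status (match_entries : List (List (String × String))) : Prop :=
  ∀ e ∈ match_entries, "status" ∈ e.map Prod.fst
instance (match_entries : List (List (String × String))) : Decidable (Pre_summarize_file_status match_entries) := by unfold Pre_summarize_file_status; infer_instance
def pvWitness_summarize_file_status : (List (List (String × String))) := [[("status", "ok")], [("status", "parse_error")]]
def Spec_summarize_file_status (match_entries : List (List (String × String))) (out : String) : Prop := out = summarize_file_status_alt match_entries
instance (match_entries : List (List (String × String))) (out : String) : Decidable (Spec_summarize_file_status match_entries out) := by unfold Spec_summarize_file_status; infer_instance

-- ===== CLAIM (what is proved, stated in full; the proofs are below) =====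
def Claim_equal_summarize_file_status : Prop := ∀ (match_entries : List (List (String × String))), Dom_summarize_file_status match_entries → Pre_summarize_file_status match_entries → Spec_summarize_file_status match_entries (summarize_file_status match_entries)

-- ===== LEMMAS AND PROOFS =====

-- B's fold computes (length, #parse_error, #ok among the non-errors) of the status list.
theorem alt_fold_counts (me : List (List (String × String))) (a b c : Int) :
    me.foldl
      (fun (acc : Int × Int × Int) e =>
        let s := (e.lookup "status").getD ""
        (acc.1 + 1,
         (if s == "parse_error" then acc.2.1 + 1 else acc.2.1),
         (if s == "parse_error" then acc.2.2 else if s == "ok" then acc.2.2 + 1 else acc.2.2)))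
      (a, b, c)
    = (a + me.length,
       b + ((me.map (fun e => (e.lookup "status").getD "")).countP (fun s => s == "parse_error") : Int),
       c + ((me.map (fun e => (e.lookup "status").getD "")).countP (fun s => s != "parse_error" && s == "ok") : Int)) := by
  induction me generalizing a b c with
  | nil => simp
  | cons e rest ih =>
    simp only [List.foldl_cons, List.map_cons, List.countP_cons, List.length_cons]
    rw [ih]
    cases hpe : ((e.lookup "status").getD "" == "parse_error") with
    | true =>
      simp only [hpe, if_true, bne, Bool.not_true, Bool.false_and, Prod.mk.injEq]
      refine ⟨by push_cast; ring, by push_cast; ring, by push_cast; ring⟩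
    | false =>
      cases hok : ((e.lookup "status").getD "" == "ok") with
      | true =>
        simp only [hpe, bne, Bool.not_false, Bool.true_and, if_true, if_false,
          Bool.false_eq_true, Prod.mk.injEq]
        refine ⟨by push_cast; ring, by push_cast; ring, by push_cast; ring⟩
      | false =>
        simp only [hpe, bne, Bool.not_false, Bool.true_and, if_false,
          Bool.false_eq_true, Prod.mk.injEq]
        refine ⟨by push_cast; ring, by push_cast; ring, by push_cast; ring⟩

theorem countP_err_pos_iff_any (l : List String) :
    (0 < (l.countP (fun s => s == "parse_error") : Int)) ↔ l.any (fun s => s == "parse_error") = true := by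
  rw [Int.natCast_pos, List.countP_pos_iff, List.any_eq_true]

theorem countP_ok_pos_iff_any (l : List String)
    (hno : l.any (fun s => s == "parse_error") = false) :
    (0 < (l.countP (fun s => s != "parse_error" && s == "ok") : Int)) ↔ l.any (fun s => s == "ok") = true := by
  rw [Int.natCast_pos, List.countP_pos_iff, List.any_eq_true]
  constructor
  · rintro ⟨s, hs, h⟩; exact ⟨s, hs, (Bool.and_eq_true ..).mp h |>.2⟩
  · rintro ⟨s, hs, h⟩
    refine ⟨s, hs, ?_⟩
    have hf : (s == "parse_error") = false := by
      cases hpe : (s == "parse_error") with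
      | false => rfl
      | true =>
        have : l.any (fun s => s == "parse_error") = true := List.any_eq_true.mpr ⟨s, hs, hpe⟩
        rw [hno] at this; exact absurd this (by simp)
    simp [bne, hf, h]

theorem countP_err_eq_len_iff_all (l : List String) :
    ((l.countP (fun s => s == "parse_error") : Int) = l.length) ↔ l.all (fun s => s == "parse_error") = true := by
  rw [Int.natCast_inj, List.countP_eq_length, List.all_eq_true]

theorem len_one_any_all (l : List String) (p : String → Bool) (h1 : l.length = 1)
    (h : l.any p = true) : l.all p = true := by
  obtain ⟨s, rfl⟩ := List.length_eq_one_iff.mp h1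
  simpa using h

-- ===== VERDICT (by name: the statement is the Claim_ definition above) =====
theorem summarize_file_status_spec : Claim_equal_summarize_file_status := by
  intro me _ _
  unfold Spec_summarize_file_status summarize_file_status summarize_file_status_alt
  rw [alt_fold_counts]
  simp only [zero_add]
  set l := me.map (fun e => (e.lookup "status").getD "") with hl
  have hlen : l.length = me.length := by simp [hl]
  by_cases hany : l.any (fun s => s == "parse_error") = true
  · have hpos : (0 < (l.countP (fun s => s == "parse_error") : Int)) :=
      (countP_err_pos_iff_any l).mpr hany
    by_cases hall : l.all (fun s => s == "parse_error") = true
    · have hc : (l.countP (fun s => s == "parse_error") : Int) = l.length :=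
        (countP_err_eq_len_iff_all l).mpr hall
      have hcb : (((l.countP (fun s => s == "parse_error") : Int)) == ((me.length : Nat) : Int)) = true := by
        rw [hc, hlen]; exact beq_self_eq_true _
      simp only [hany, hall, Bool.or_true, if_true, gt_iff_lt]
      rw [if_pos hpos, if_pos hcb]
    · have hallf : l.all (fun s => s == "parse_error") = false := by simpa using hall
      have hlen1 : (l.length == 1) = false := by
        cases h1 : (l.length == 1) with
        | false => rfl
        | true => exact absurd (len_one_any_all l _ (by simpa using h1) hany) hall
      have hcne : ¬ ((((l.countP (fun s => s == "parse_error") : Int)) == ((me.length : Nat) : Int)) = true) := by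
        rw [← hlen]
        simp only [beq_iff_eq]
        exact fun h => hall ((countP_err_eq_len_iff_all l).mp h)
      simp only [hany, hallf, hlen1, Bool.or_self, if_true, gt_iff_lt]
      rw [if_neg (by simp), if_pos hpos, if_neg hcne]
  · have hanyf : l.any (fun s => s == "parse_error") = false := Bool.eq_false_iff.mpr hany
    have hz : (l.countP (fun s => s == "parse_error") : Int) = 0 := by
      by_contra h
      exact hany ((countP_err_pos_iff_any l).mp
        (lt_of_le_of_ne (Int.natCast_nonneg _) (Ne.symm h)))
    by_cases hok : l.any (fun s => s == "ok") = true
    · have hp := (countP_ok_pos_iff_any l hanyf).mpr hok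
      simp only [hanyf, hok, Bool.false_eq_true, if_false, if_true, gt_iff_lt]
      rw [if_neg (by omega), if_pos hp]
    · have hokf : l.any (fun s => s == "ok") = false := Bool.eq_false_iff.mpr hok
      have hp : ¬ (0 < (l.countP (fun s => s != "parse_error" && s == "ok") : Int)) :=
        fun h => hok ((countP_ok_pos_iff_any l hanyf).mp h)
      simp only [hanyf, hokf, Bool.false_eq_true, if_false, gt_iff_lt]
      rw [if_neg (by omega), if_neg hp]
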